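-- pv_equiv track=rewrite | github.com/LIAAD/Text2StoryPackage | text2story/brat2viz/brat2drs/brat2drs.py | format_tuple
-- ===== SOURCE A (Python) =====
-- def format_tuple(dexpr_list):
--     for n, x in enumerate(dexpr_list):
--         e_attr = list(x)
--         k = x + (e_attr[1],)
--
--         for i in e_attr[2:]:
--             k = k + (k[-1] + i,)
--         x = x + (k[-1],)
--         dexpr_list[n] = x
--
--     return dexpr_list
-- ===== SOURCE B (Python) =====
-- def format_tuple(dexpr_list):
--     # Builds a new list; A mutates dexpr_list in place (return values are equal).
--     return [x + (''.join(x[1:]),) for x in dexpr_list]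
-- ===== Notes on version B (the rewrite author's own statement) =====
-- stated objective: faster
-- what changed: Replaces the inner loop that rebuilds the growing tuple k once per element (quadratic in tuple width) by a single ''.join of the tuple's tail in a list comprehension.
-- outside the precondition, e.g. on format_tuple([('a',)]): A raises IndexError, B returns [('a', '')]
import Mathlib
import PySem

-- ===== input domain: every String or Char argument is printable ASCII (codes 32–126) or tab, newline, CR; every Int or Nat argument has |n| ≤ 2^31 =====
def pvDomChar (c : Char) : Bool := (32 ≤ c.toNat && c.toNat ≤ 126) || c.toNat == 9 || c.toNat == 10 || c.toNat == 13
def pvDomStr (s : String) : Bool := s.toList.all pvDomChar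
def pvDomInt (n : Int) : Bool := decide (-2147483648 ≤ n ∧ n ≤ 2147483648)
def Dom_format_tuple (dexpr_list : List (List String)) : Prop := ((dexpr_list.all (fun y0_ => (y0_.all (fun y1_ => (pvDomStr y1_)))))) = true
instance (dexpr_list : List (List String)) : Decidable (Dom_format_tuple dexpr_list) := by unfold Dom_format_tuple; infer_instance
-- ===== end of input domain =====

-- B builds each row's appended string with one ''.join of the tuple's tail instead of A's
-- inner loop that re-extends the tuple k once per element; A mutates dexpr_list in place,
-- B returns a new list (the proved equivalence is about the return value).

-- ===== PORT A =====
-- loop body of A's 'for n, x in enumerate(dexpr_list)'; the 'none' branch is Python's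
-- IndexError on x[1] (rows shorter than 2), excluded by Pre_format_tuple
def pvRowA (x : List String) : List String :=
  let e_attr := x
  match PySem.List.pyGet? e_attr 1 with
  | none => x
  | some v =>
    let k0 := x ++ [v]
    let k := (PySem.List.slice e_attr (some 2) none).foldl
      (fun k i => k ++ [(PySem.List.pyGet? k (-1)).getD "" ++ i]) k0
    x ++ [(PySem.List.pyGet? k (-1)).getD ""]

def format_tuple (dexpr_list : List (List String)) : List (List String) :=
  (PySem.List.enumerate dexpr_list).foldl
    (fun acc p => PySem.List.pySetD acc p.1 (pvRowA p.2)) dexpr_list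

-- ===== PORT B =====
def format_tuple_alt (dexpr_list : List (List String)) : List (List String) :=
  dexpr_list.map (fun x => x ++ [PySem.Str.join "" (PySem.List.slice x (some 1) none)])

-- ===== PRECONDITION & SPEC =====
-- Pre_ excludes exactly the inputs where A raises: a row of length < 2 makes x[1] an IndexError.
def Pre_format_tuple (dexpr_list : List (List String)) : Prop :=
  ∀ x ∈ dexpr_list, 2 ≤ x.length
instance (dexpr_list : List (List String)) : Decidable (Pre_format_tuple dexpr_list) := by unfold Pre_format_tuple; infer_instance

def pvWitness_format_tuple : List (List String) := [["a", "b", "c"], ["x", "y"]]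

def Spec_format_tuple (dexpr_list : List (List String)) (out : List (List String)) : Prop := out = format_tuple_alt dexpr_list
instance (dexpr_list : List (List String)) (out : List (List String)) : Decidable (Spec_format_tuple dexpr_list out) := by unfold Spec_format_tuple; infer_instance

-- ===== CLAIM (what is proved, stated in full; the proofs are below) =====
def Claim_equal_format_tuple : Prop := ∀ (dexpr_list : List (List String)), Dom_format_tuple dexpr_list → Pre_format_tuple dexpr_list → Spec_format_tuple dexpr_list (format_tuple dexpr_list)
-- ===== LEMMAS AND PROOFS =====

-- ''.join over strings peels off its head
lemma join_empty_cons (p : String) (l : List String) :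
    PySem.Str.join "" (p :: l) = p ++ PySem.Str.join "" l := by
  apply String.toList_injective
  cases l <;> simp [PySem.Str.toList_join, PySem.Chars.join, List.intercalate]

-- A's inner accumulation loop: the last element of the grown list is s followed by
-- the concatenation of l
lemma inner_fold_last (l : List String) : ∀ (k : List String) (s : String),
    (PySem.List.pyGet?
      (l.foldl (fun k i => k ++ [(PySem.List.pyGet? k (-1)).getD "" ++ i]) (k ++ [s]))
      (-1)).getD "" = s ++ PySem.Str.join "" l := by
  induction l with
  | nil =>
    simp [PySem.List.pyGet?_neg_one_append_singleton, PySem.Str.join, PySem.Chars.join,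
      List.intercalate]
  | cons i l ih =>
    intro k s
    have hstep : (k ++ [s]) ++ [(PySem.List.pyGet? (k ++ [s]) (-1)).getD "" ++ i]
        = (k ++ [s]) ++ [s ++ i] := by
      rw [PySem.List.pyGet?_neg_one_append_singleton]; rfl
    simp only [List.foldl_cons, hstep]
    rw [ih (k ++ [s]) (s ++ i), join_empty_cons, String.append_assoc]

-- per-row agreement under the length precondition
lemma row_eq (x : List String) (hx : 2 ≤ x.length) :
    pvRowA x = x ++ [PySem.Str.join "" (PySem.List.slice x (some 1) none)] := by
  match x, hx with
  | a :: b :: t, _ =>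
    have hg : PySem.List.pyGet? (a :: b :: t) 1 = some b := by
      have h1 : (1 : Int) = ((1 : Nat) : Int) := rfl
      rw [h1, PySem.List.pyGet?_natCast]; rfl
    have h2 : PySem.List.slice (a :: b :: t) (some 2) none = t := by
      rw [PySem.List.slice_from (xs := a :: b :: t) (a := 2) (by norm_num)]; rfl
    have h1 : PySem.List.slice (a :: b :: t) (some 1) none = b :: t := by
      rw [PySem.List.slice_from (xs := a :: b :: t) (a := 1) (by norm_num)]; rfl
    simp only [pvRowA, hg, h1, h2]
    rw [show (a :: b :: t) ++ [b] = (a :: b :: t) ++ [b] from rfl,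
      inner_fold_last t (a :: b :: t) b, join_empty_cons]

-- A's enumerate/set loop over the original rows is a map
lemma fold_set_eq_map (f : List String → List String) :
    ∀ (l pre : List (List String)),
    (PySem.List.enumerate l (pre.length : Int)).foldl
      (fun acc p => PySem.List.pySetD acc p.1 (f p.2)) (pre ++ l) = pre ++ l.map f := by
  intro l
  induction l with
  | nil => intro pre; simp [PySem.List.enumerate]
  | cons x l ih =>
    intro pre
    rw [PySem.List.enumerate_cons]
    simp only [List.foldl_cons]
    have hset : PySem.List.pySetD (pre ++ x :: l) (pre.length : Int) (f x)
        = pre ++ f x :: l := by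
      unfold PySem.List.pySetD
      rw [PySem.List.pySet?_natCast (xs := pre ++ x :: l) (n := pre.length) (v := f x) (by simp)]
      simp
    rw [hset]
    have h := ih (pre ++ [f x])
    simp only [List.length_append, List.length_singleton, List.append_assoc,
      List.singleton_append, Nat.cast_add, Nat.cast_one] at h
    rw [List.map_cons, ← List.singleton_append, ← List.append_assoc]
    rw [← h]
    norm_num

-- ===== VERDICT (by name: the statement is the Claim_ definition above) =====
theorem format_tuple_spec : Claim_equal_format_tuple := by
  intro l _ hpre
  unfold Spec_format_tuple format_tuple format_tuple_alt
  have h := fold_set_eq_map pvRowA l []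
  simp only [List.nil_append, List.length_nil, Int.ofNat_zero] at h
  rw [h]
  exact List.map_congr_left fun x hx => row_eq x (hpre x hx)
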